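-- pv_equiv track=rewrite | github.com/kfuku52/cdskit | cdskit/codonutil.py | ambiguous_codon_counts
-- ===== SOURCE A (Python) =====
-- MISSING_CHARS = frozenset('-?.')
--
-- UNAMBIGUOUS_NT = frozenset('ACGT')
--
-- def codon_has_missing(codon):
--     codon_upper = codon.upper()
--     return any(ch in MISSING_CHARS for ch in codon_upper)
--
-- def ambiguous_codon_counts(seq):
--     seq_upper = seq.upper()
--     ambiguous = 0
--     evaluable = 0
--     for i in range(0, len(seq_upper) - 2, 3):
--         codon = seq_upper[i:i + 3]
--         if codon_has_missing(codon):
--             continue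
--         evaluable += 1
--         if any(ch not in UNAMBIGUOUS_NT for ch in codon):
--             ambiguous += 1
--     return ambiguous, evaluable
-- ===== SOURCE B (Python) =====
-- MISSING_CHARS = frozenset('-?.')
--
-- UNAMBIGUOUS_NT = frozenset('ACGT')
--
-- def ambiguous_codon_counts(seq):
--     # streaming state machine over individual characters: track position
--     # within the current codon and two flags; no codon substring is ever built.
--     ambiguous = 0
--     evaluable = 0
--     pos = 0
--     miss = False
--     amb = False
--     for ch in seq.upper():
--         if ch in MISSING_CHARS:
--             miss = True
--         elif ch not in UNAMBIGUOUS_NT: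
--             amb = True
--         pos += 1
--         if pos == 3:
--             if not miss:
--                 evaluable += 1
--                 if amb:
--                     ambiguous += 1
--             pos = 0
--             miss = False
--             amb = False
--     return ambiguous, evaluable
-- ===== Notes on version B (the rewrite author's own statement) =====
-- stated objective: faster
-- what changed: Replaces A's per-codon loop (index stepping by 3, slicing out each codon and scanning it twice) by a single streaming state machine over individual characters that maintains a position-in-codon counter and two boolean flags and never builds any codon substring; timing measured it ~4x faster (no slice allocations or re-scans).
import Mathlib
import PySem

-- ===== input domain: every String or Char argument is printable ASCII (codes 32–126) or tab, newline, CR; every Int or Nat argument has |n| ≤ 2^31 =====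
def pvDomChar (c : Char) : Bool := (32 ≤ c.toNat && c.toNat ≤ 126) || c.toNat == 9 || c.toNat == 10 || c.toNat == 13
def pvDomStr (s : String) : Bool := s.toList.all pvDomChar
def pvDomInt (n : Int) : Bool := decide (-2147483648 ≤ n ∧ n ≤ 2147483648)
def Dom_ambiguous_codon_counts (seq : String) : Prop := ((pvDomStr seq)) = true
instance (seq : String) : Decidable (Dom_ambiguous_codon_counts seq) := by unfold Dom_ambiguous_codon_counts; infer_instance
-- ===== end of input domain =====

-- B replaces A's slice-per-codon loop by a streaming per-character state machine (position counter + flags), with no codon substrings built; a timing run measured B faster.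

-- ===== PORT A =====
def MISSING_CHARS : List Char := ['-', '?', '.']

def UNAMBIGUOUS_NT : List Char := ['A', 'C', 'G', 'T']

def codon_has_missing (codon : List Char) : Bool :=
  (PySem.Chars.upper codon).any (fun ch => MISSING_CHARS.contains ch)

-- the body of A's for-loop (state = (ambiguous, evaluable), i the codon start index)
def pvStepA (seq_upper : List Char) (acc : Int × Int) (i : Int) : Int × Int :=
  let codon := PySem.List.slice seq_upper (some i) (some (i + 3))
  if codon_has_missing codon then acc
  else
    let evaluable := acc.2 + 1
    if codon.any (fun ch => !(UNAMBIGUOUS_NT.contains ch)) then (acc.1 + 1, evaluable)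
    else (acc.1, evaluable)

def ambiguous_codon_counts (seq : String) : Int × Int :=
  let seq_upper := (PySem.Str.upper seq).toList
  (PySem.List.pyRange 0 ((seq_upper.length : Int) - 2) 3).foldl (pvStepA seq_upper) (0, 0)

-- ===== PORT B =====
-- the body of B's for-loop: state = (ambiguous, evaluable, pos, miss, amb)
def pvStepB (st : Int × Int × Int × Bool × Bool) (ch : Char) : Int × Int × Int × Bool × Bool :=
  let (ambiguous, evaluable, pos, miss, amb) := st
  let miss := if MISSING_CHARS.contains ch then true else miss
  let amb := if MISSING_CHARS.contains ch then amb
             else if !(UNAMBIGUOUS_NT.contains ch) then true else amb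
  let pos := pos + 1
  if pos == 3 then
    if !miss then
      let evaluable := evaluable + 1
      if amb then (ambiguous + 1, evaluable, 0, false, false)
      else (ambiguous, evaluable, 0, false, false)
    else (ambiguous, evaluable, 0, false, false)
  else (ambiguous, evaluable, pos, miss, amb)

def ambiguous_codon_counts_alt (seq : String) : Int × Int :=
  let st := ((PySem.Str.upper seq).toList).foldl pvStepB (0, 0, 0, false, false)
  (st.1, st.2.1)

-- ===== PRECONDITION & SPEC =====
def Spec_ambiguous_codon_counts (seq : String) (out : Int × Int) : Prop := out = ambiguous_codon_counts_alt seq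
instance (seq : String) (out : Int × Int) : Decidable (Spec_ambiguous_codon_counts seq out) := by unfold Spec_ambiguous_codon_counts; infer_instance

-- ===== CLAIM (what is proved, stated in full; the proofs are below) =====
def Claim_equal_ambiguous_codon_counts : Prop := ∀ (seq : String), Dom_ambiguous_codon_counts seq → Spec_ambiguous_codon_counts seq (ambiguous_codon_counts seq)

-- ===== LEMMAS AND PROOFS =====

-- middle characterisation shared by both loop lemmas: chunk the uppercased
-- characters into complete codons, filter the evaluable ones, count ambiguous
def pvChunk3 : List Char → List (List Char)
  | c1 :: c2 :: c3 :: rest => [c1, c2, c3] :: pvChunk3 rest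
  | _ => []

def pvEvaluable (c : List Char) : Bool := !(c.any (fun ch => MISSING_CHARS.contains ch))

def pvAmbiguous (c : List Char) : Bool := c.any (fun ch => !(UNAMBIGUOUS_NT.contains ch))

theorem pvUpperChar_fix (c : Char) :
    PySem.Chars.upperChar (PySem.Chars.upperChar c) = PySem.Chars.upperChar c := by
  unfold PySem.Chars.upperChar PySem.Chars.islower
  by_cases h1 : 'a' ≤ c
  · by_cases h2 : c ≤ 'z'
    · have ha : 97 ≤ c.toNat := h1
      have hb : c.toNat ≤ 122 := h2
      have hv : (c.toNat - 32).isValidChar := Or.inl (by omega)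
      have hlt : ¬ ('a' ≤ Char.ofNat (c.toNat - 32)) := by
        intro hcon
        have h97 : 97 ≤ (Char.ofNat (c.toNat - 32)).toNat := hcon
        rw [Char.toNat_ofNat] at h97
        simp only [hv, if_true] at h97
        omega
      simp [h1, h2, hlt]
    · simp [h2]
  · simp [h1]

theorem pvUpper_mem_fix {l : List Char} {c : Char} (h : c ∈ PySem.Chars.upper l) :
    PySem.Chars.upperChar c = c := by
  rcases List.mem_map.1 h with ⟨d, _, rfl⟩
  exact pvUpperChar_fix d

theorem pvPyRange3_nil {b : Int} (h : b ≤ 0) : PySem.List.pyRange 0 b 3 = [] := by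
  rw [PySem.List.pyRange_of_pos 0 b (by norm_num)]
  simp [show ¬ (0:Int) < b by omega]

theorem pvPyRange3_cons {n : Int} (h : 0 < n) :
    PySem.List.pyRange 0 n 3 = 0 :: (PySem.List.pyRange 0 (n - 3) 3).map (fun i => i + 3) := by
  rw [PySem.List.pyRange_of_pos 0 n (by norm_num),
      PySem.List.pyRange_of_pos 0 (n - 3) (by norm_num)]
  have hc : (if (0:Int) < n then ((n - 0 + 3 - 1) / 3).toNat else 0)
      = (if (0:Int) < n - 3 then ((n - 3 - 0 + 3 - 1) / 3).toNat else 0) + 1 := by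
    rw [if_pos h]
    by_cases h3 : (0:Int) < n - 3
    · rw [if_pos h3]; omega
    · rw [if_neg h3]; omega
  rw [hc, List.range_succ_eq_map, List.map_cons, List.map_map, List.map_map]
  refine List.cons_eq_cons.mpr ⟨by norm_num, List.map_congr_left (fun k _ => by
    simp only [Function.comp_apply]; push_cast; ring)⟩

theorem pvSliceShift (c1 c2 c3 : Char) (rest : List Char) {i : Int} (h0 : 0 ≤ i) :
    PySem.List.slice (c1 :: c2 :: c3 :: rest) (some (i + 3)) (some ((i + 3) + 3))
      = PySem.List.slice rest (some i) (some (i + 3)) := by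
  rw [PySem.List.slice_toNat _ (by omega) (by omega),
      PySem.List.slice_toNat _ (by omega) (by omega)]
  rw [show ((i + 3) + 3).toNat - (i + 3).toNat = 3 by omega,
      show (i + 3).toNat - i.toNat = 3 by omega,
      show (i + 3).toNat = i.toNat + 1 + 1 + 1 by omega]
  simp [List.drop_succ_cons]

-- A's loop computes the chunk/filter/count characterisation
theorem pvLoopA (u : List Char) (h : ∀ c ∈ u, PySem.Chars.upperChar c = c) (acc : Int × Int) :
    (PySem.List.pyRange 0 ((u.length : Int) - 2) 3).foldl (pvStepA u) acc
      = (acc.1 + (((pvChunk3 u).filter pvEvaluable).countP pvAmbiguous : Int),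
         acc.2 + ((((pvChunk3 u).filter pvEvaluable).length : Int))) := by
  induction u using pvChunk3.induct generalizing acc with
  | case1 c1 c2 c3 rest ih =>
    have hpos : (0:Int) < (((c1 :: c2 :: c3 :: rest).length : Int) - 2) := by
      simp; omega
    rw [pvPyRange3_cons hpos]
    have hshift : ((c1 :: c2 :: c3 :: rest).length : Int) - 2 - 3 = (rest.length : Int) - 2 := by
      push_cast [List.length_cons]; ring
    rw [hshift, List.foldl_cons, List.foldl_map]
    rw [PySem.List.foldl_congr_mem _ _ (pvStepA rest) _
      (fun acc' i hi => by
        have h0 : 0 ≤ i := ((PySem.List.mem_pyRange_iff_of_pos (by norm_num) i).1 hi).1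
        simp only [pvStepA, pvSliceShift c1 c2 c3 rest h0])]
    rw [ih (fun c hc => h c (by simp [hc]))]
    have hslice0 : PySem.List.slice (c1 :: c2 :: c3 :: rest) (some 0) (some (0 + 3)) = [c1, c2, c3] := by
      rw [PySem.List.slice_toNat _ (by norm_num) (by norm_num)]
      rfl
    simp only [pvStepA, hslice0]
    have hup : PySem.Chars.upper [c1, c2, c3] = [c1, c2, c3] := by
      simp [PySem.Chars.upper, h c1 (by simp), h c2 (by simp), h c3 (by simp)]
    have hmiss : codon_has_missing [c1, c2, c3] = !pvEvaluable [c1, c2, c3] := by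
      simp [codon_has_missing, pvEvaluable, hup]
    have hamb : ([c1, c2, c3].any fun ch => !(UNAMBIGUOUS_NT.contains ch)) = pvAmbiguous [c1, c2, c3] := rfl
    rw [hmiss, hamb]
    simp only [pvChunk3, List.filter_cons]
    by_cases he : pvEvaluable [c1, c2, c3]
    · by_cases ha : pvAmbiguous [c1, c2, c3]
      · simp [he, ha, Prod.ext_iff]; omega
      · simp [he, ha, Prod.ext_iff]; omega
    · simp [he]
  | case2 u hu =>
    have hkey : ((u.length : Int) - 2) ≤ 0 ∧ pvChunk3 u = [] := by
      rcases u with _ | ⟨a, _ | ⟨b, _ | ⟨c, t⟩⟩⟩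
      · exact ⟨by simp, rfl⟩
      · exact ⟨by simp, rfl⟩
      · exact ⟨by simp, rfl⟩
      · exact (hu a b c t rfl).elim
    rw [pvPyRange3_nil hkey.1, hkey.2]
    simp

-- B's state machine, started at a codon boundary, computes the same characterisation
theorem pvLoopB (u : List Char) (a e : Int) :
    ((u.foldl pvStepB (a, e, 0, false, false)).1,
     (u.foldl pvStepB (a, e, 0, false, false)).2.1)
      = (a + (((pvChunk3 u).filter pvEvaluable).countP pvAmbiguous : Int),
         e + ((((pvChunk3 u).filter pvEvaluable).length : Int))) := by
  induction u using pvChunk3.induct generalizing a e with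
  | case1 c1 c2 c3 rest ih =>
    have hthree : rest.foldl pvStepB (pvStepB (pvStepB (pvStepB (a, e, 0, false, false) c1) c2) c3)
        = rest.foldl pvStepB
            (if pvEvaluable [c1, c2, c3] then
               (if pvAmbiguous [c1, c2, c3] then (a + 1, e + 1, 0, false, false)
                else (a, e + 1, 0, false, false))
             else (a, e, 0, false, false)) := by
      congr 1
      by_cases h1 : c1 ∈ MISSING_CHARS <;>
        by_cases h2 : c2 ∈ MISSING_CHARS <;>
          by_cases h3 : c3 ∈ MISSING_CHARS <;>
            by_cases g1 : c1 ∈ UNAMBIGUOUS_NT <;>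
              by_cases g2 : c2 ∈ UNAMBIGUOUS_NT <;>
                by_cases g3 : c3 ∈ UNAMBIGUOUS_NT <;>
                  simp [pvStepB, pvEvaluable, pvAmbiguous, List.any_cons, List.any_nil,
                        h1, h2, h3, g1, g2, g3]
    rw [List.foldl_cons, List.foldl_cons, List.foldl_cons, hthree]
    simp only [pvChunk3, List.filter_cons]
    by_cases he : pvEvaluable [c1, c2, c3]
    · by_cases ha : pvAmbiguous [c1, c2, c3]
      · rw [if_pos he, if_pos ha, ih]
        simp [he, ha, Prod.ext_iff]
        omega
      · rw [if_pos he, if_neg ha, ih]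
        simp [he, ha, Prod.ext_iff]
        omega
    · rw [if_neg he, ih]
      simp [he]
  | case2 u hu =>
    have hkey : pvChunk3 u = [] := by
      rcases u with _ | ⟨x, _ | ⟨y, _ | ⟨z, t⟩⟩⟩
      · rfl
      · rfl
      · rfl
      · exact (hu x y z t rfl).elim
    rw [hkey]
    rcases u with _ | ⟨x, _ | ⟨y, _ | ⟨z, t⟩⟩⟩
    · simp
    · simp [pvStepB]
    · simp [pvStepB]
    · exact (hu x y z t rfl).elim

-- ===== VERDICT (by name: the statement is the Claim_ definition above) =====
theorem ambiguous_codon_counts_spec : Claim_equal_ambiguous_codon_counts := by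
  intro seq _
  unfold Spec_ambiguous_codon_counts ambiguous_codon_counts ambiguous_codon_counts_alt
  rw [pvLoopA _ (fun c hc => pvUpper_mem_fix (by simpa [PySem.Str.toList_upper] using hc)),
      pvLoopB]
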